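-- pv_equiv track=rewrite | github.com/AdamZhouSE/pythonHomework | Code/CodeRecords/2850/60601/260532.py | solve
-- ===== SOURCE A (Python) =====
-- def solve(num:list,k:int):
--     Max = num.count(1)
--     for i in range(len(num)-k+1):
--         newNum = list(num)
--         for j in range(0,k):
--             newNum[i+j] = 1 - newNum[i+j]
--         Max = max(Max,newNum.count(1))
--     return Max
-- ===== SOURCE B (Python) =====
-- def solve(num: list, k: int):
--     # Sliding-window: net gain of flipping a window = (#zeros - #ones) inside it.
--     base = sum(1 for x in num if x == 1)
--     n = len(num)
--     if k < 1 or k > n: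
--         return base
--     w = [(1 if x == 0 else 0) - (1 if x == 1 else 0) for x in num]
--     cur = sum(w[:k])
--     best = cur
--     for t in range(k, n):
--         cur += w[t] - w[t - k]
--         if cur > best:
--             best = cur
--     return base + max(0, best)
-- ===== Notes on version B (the rewrite author's own statement) =====
-- stated objective: faster
-- what changed: Replaces the O(n*k) per-window rebuild-and-recount (copy list, flip k entries, count ones) by a single O(n) sliding-window pass over per-element flip gains (+1 for a 0, -1 for a 1), adding the best positive gain to the original count of ones.
import Mathlib
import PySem

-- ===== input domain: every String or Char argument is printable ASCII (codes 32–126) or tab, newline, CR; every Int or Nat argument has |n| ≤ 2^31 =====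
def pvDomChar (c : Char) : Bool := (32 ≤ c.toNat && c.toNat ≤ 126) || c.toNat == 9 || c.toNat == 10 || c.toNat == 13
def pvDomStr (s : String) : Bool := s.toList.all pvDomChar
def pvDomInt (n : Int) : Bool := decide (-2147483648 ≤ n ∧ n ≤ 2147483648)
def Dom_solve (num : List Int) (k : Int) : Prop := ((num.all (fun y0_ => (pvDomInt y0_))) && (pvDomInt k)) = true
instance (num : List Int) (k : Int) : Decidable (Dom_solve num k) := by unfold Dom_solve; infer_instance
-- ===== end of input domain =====

-- B replaces A's O(n*k) per-window rebuild-and-recount by one O(n) sliding-window pass over flip gains.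


-- ===== PORT A =====
def solve (num : List Int) (k : Int) : Int :=
  let Max : Int := (PySem.List.count num 1 : Int)
  (PySem.List.pyRange 0 ((num.length : Int) - k + 1) 1).foldl
    (fun Max i =>
      let newNum :=
        (PySem.List.pyRange 0 k 1).foldl
          (fun nn j => PySem.List.pySetD nn (i + j) (1 - PySem.List.pyGetD nn (i + j) 0)) num
      max Max (PySem.List.count newNum 1 : Int))
    Max

-- ===== PORT B =====
-- gain of flipping one element: (1 if x == 0 else 0) - (1 if x == 1 else 0)
def pvWgt (x : Int) : Int := (if x == 0 then 1 else 0) - (if x == 1 then 1 else 0)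

def solve_alt (num : List Int) (k : Int) : Int :=
  let base : Int := (num.countP (fun x => x == 1) : Int)
  let n : Int := (num.length : Int)
  if k < 1 ∨ n < k then base
  else
    let w := num.map pvWgt
    let cur : Int := (PySem.List.slice w none (some k)).sum
    let res :=
      (PySem.List.pyRange k n 1).foldl
        (fun (s : Int × Int) t =>
          let cur := s.1 + PySem.List.pyGetD w t 0 - PySem.List.pyGetD w (t - k) 0
          (cur, if s.2 < cur then cur else s.2))
        (cur, cur)
    base + max 0 res.2

-- ===== PRECONDITION & SPEC =====
def Spec_solve (num : List Int) (k : Int) (out : Int) : Prop := out = solve_alt num k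
instance (num : List Int) (k : Int) (out : Int) : Decidable (Spec_solve num k out) := by unfold Spec_solve; infer_instance

-- ===== CLAIM (what is proved, stated in full; the proofs are below) =====
def Claim_equal_solve : Prop := ∀ (num : List Int) (k : Int), Dom_solve num k → Spec_solve num k (solve num k)

-- ===== LEMMAS AND PROOFS =====

-- gain of window starting at i (length kn), as a total function (getD-based)
def pvG (w : List Int) (kn i : Nat) : Int := ∑ j ∈ Finset.range kn, w.getD (i + j) 0

-- running max over g 0 .. g (m-1), floored at 0
def pvBest (g : Nat → Int) (m : Nat) : Int := (List.range m).foldl (fun acc j => max acc (g j)) 0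

-- sum of a contiguous window as a range sum
theorem pv_window_sum (xs : List Int) (m i : Nat) (h : i + m ≤ xs.length) :
    ((xs.drop i).take m).sum = ∑ j ∈ Finset.range m, xs.getD (i + j) 0 := by
  induction m with
  | zero => simp
  | succ m ih =>
    have h' : i + m ≤ xs.length := by omega
    have hlt : i + m < xs.length := by omega
    have hm : m < (xs.drop i).length := by simp; omega
    rw [List.take_succ, Finset.sum_range_succ, ← ih h']
    have : (xs.drop i)[m]? = some xs[i + m] := by
      rw [List.getElem?_eq_getElem hm]
      simp [List.getElem_drop]
    rw [this]
    simp [List.getD_eq_getElem?_getD, List.getElem?_eq_getElem hlt]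

-- slide identity: g (m+1) = g m + w[m+kn] - w[m]  (unconditional, getD-total)
theorem pv_slide (w : List Int) (kn m : Nat) :
    pvG w kn (m + 1) = pvG w kn m + w.getD (m + kn) 0 - w.getD m 0 := by
  unfold pvG
  have h1 : (∑ j ∈ Finset.range (kn + 1), w.getD (m + j) 0)
      = (∑ j ∈ Finset.range kn, w.getD (m + j) 0) + w.getD (m + kn) 0 :=
    Finset.sum_range_succ _ _
  have h2 : (∑ j ∈ Finset.range (kn + 1), w.getD (m + j) 0)
      = (∑ j ∈ Finset.range kn, w.getD (m + (j + 1)) 0) + w.getD (m + 0) 0 :=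
    Finset.sum_range_succ' _ _
  have h3 : (∑ j ∈ Finset.range kn, w.getD (m + (j + 1)) 0)
      = ∑ j ∈ Finset.range kn, w.getD (m + 1 + j) 0 := by
    apply Finset.sum_congr rfl; intro j _; ring_nf
  simp only [Nat.add_zero] at h2
  omega

-- wgt sum over a window = #zeros - #ones
theorem pv_wgt_sum (l : List Int) :
    (l.map pvWgt).sum = (l.count 0 : Int) - (l.count 1 : Int) := by
  induction l with
  | nil => simp
  | cons x t ih =>
    simp only [List.map_cons, List.sum_cons, ih, List.count_cons, pvWgt]
    by_cases h0 : x = 0 <;> by_cases h1 : x = 1 <;> simp [h0, h1] <;> omega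

-- the inner flip loop rewrites exactly the window [i, i+m)
theorem pv_flip_fold (num : List Int) (i m : Nat) (h : i + m ≤ num.length) :
    (PySem.List.pyRange 0 (m : Int) 1).foldl
      (fun nn j => PySem.List.pySetD nn ((i : Int) + j) (1 - PySem.List.pyGetD nn ((i : Int) + j) 0)) num
    = num.take i ++ ((num.drop i).take m).map (fun x => 1 - x) ++ num.drop (i + m) := by
  induction m with
  | zero =>
    rw [PySem.List.pyRange_one_eq_nil (by omega)]
    simp
  | succ m ih =>
    have h' : i + m ≤ num.length := by omega
    have hcast : ((m : Int) + 1) = (((m + 1 : Nat)) : Int) := by push_cast; ring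
    rw [← hcast, PySem.List.pyRange_one_succ_right (by omega), List.foldl_append, ih h']
    set pre := num.take i ++ ((num.drop i).take m).map (fun x => 1 - x) with hpre
    have hlt : i + m < num.length := by omega
    have hlenpre : pre.length = i + m := by
      simp [hpre, List.length_take, List.length_drop]; omega
    have hidx : (i : Int) + (m : Int) = ((i + m : Nat) : Int) := by push_cast; ring
    have hget : PySem.List.pyGetD (pre ++ num.drop (i + m)) ((i : Int) + (m : Int)) 0 = num[i + m] := by
      rw [hidx, PySem.List.pyGetD_natCast]
      rw [List.getD_eq_getElem?_getD, List.getElem?_append_right (by omega)]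
      simp [hlenpre, List.getElem?_eq_getElem (by simp [List.length_drop]; omega : 0 < (num.drop (i+m)).length)]
    have hset : PySem.List.pySetD (pre ++ num.drop (i + m)) ((i : Int) + (m : Int)) (1 - num[i + m])
        = pre ++ [1 - num[i + m]] ++ num.drop (i + m + 1) := by
      rw [hidx, PySem.List.pySetD_natCast, List.drop_eq_getElem_cons hlt,
        List.set_append_right _ _ (by omega : pre.length ≤ i + m)]
      rw [show i + m - pre.length = 0 by omega]
      simp only [List.append_assoc]
      rw [List.set_cons_zero]
      simp
    simp only [List.foldl_cons, List.foldl_nil, hget, hset]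
    have htake : ((num.drop i).take (m + 1)).map (fun x => 1 - x)
        = ((num.drop i).take m).map (fun x => 1 - x) ++ [1 - num[i + m]] := by
      have hm : m < (num.drop i).length := by simp; omega
      rw [List.take_succ, List.getElem?_eq_getElem hm]
      simp [List.getElem_drop]
    rw [htake, hpre]
    simp [List.append_assoc]
    omega

-- counting ones after flipping window i: base + (#zeros - #ones in the window)
theorem pv_count_flipped (num : List Int) (i m : Nat) (_h : i + m ≤ num.length) :
    ((num.take i ++ ((num.drop i).take m).map (fun x => 1 - x) ++ num.drop (i + m)).count 1 : Int)
    = (num.count 1 : Int) + (((num.drop i).take m).map pvWgt).sum := by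
  set win := (num.drop i).take m with hwin
  have hdi : num.drop i = win ++ num.drop (i + m) := by
    conv_lhs => rw [← List.take_append_drop m (num.drop i)]
    rw [List.drop_drop, Nat.add_comm]
  have hsplit : num = num.take i ++ win ++ num.drop (i + m) := by
    rw [List.append_assoc, ← hdi, List.take_append_drop]
  have hflipcount : (win.map (fun x => 1 - x)).count 1 = win.count 0 := by
    rw [List.count_eq_countP, List.count_eq_countP, List.countP_map]
    apply List.countP_congr
    intro x _
    simp only [Function.comp_apply, beq_iff_eq]
    omega
  rw [pv_wgt_sum]
  conv_rhs => rw [hsplit]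
  simp only [List.count_append, hflipcount]
  push_cast
  ring

-- A's outer fold of running max, over gains g
theorem pv_maxfold (g : Nat → Int) (b : Int) (M : Nat) :
    (PySem.List.pyRange 0 (M : Int) 1).foldl (fun acc i => max acc (b + g i.toNat)) b
    = b + pvBest g M := by
  induction M with
  | zero =>
    rw [PySem.List.pyRange_one_eq_nil (by omega)]
    simp [pvBest]
  | succ M ih =>
    have hcast : (((M + 1 : Nat)) : Int) = (M : Int) + 1 := by push_cast; ring
    rw [hcast, PySem.List.pyRange_one_succ_right (by omega), List.foldl_append, ih]
    unfold pvBest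
    rw [List.range_succ, List.foldl_append]
    simp only [List.foldl_cons, List.foldl_nil, Int.toNat_natCast]
    omega

-- pull an outer max into a max-fold
theorem pv_max_foldl (l : List Int) (a b : Int) :
    max b (l.foldl max a) = l.foldl max (max b a) := by
  induction l generalizing a with
  | nil => rfl
  | cons x t ih => simp only [List.foldl_cons, ih, max_assoc]

-- B's sliding fold, fully characterised
theorem pv_slidefold (w : List Int) (kn : Nat) (m : Nat) :
    (PySem.List.pyRange (kn : Int) ((kn : Int) + (m : Int)) 1).foldl
      (fun (s : Int × Int) t =>
        let cur := s.1 + PySem.List.pyGetD w t 0 - PySem.List.pyGetD w (t - (kn : Int)) 0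
        (cur, if s.2 < cur then cur else s.2))
      (pvG w kn 0, pvG w kn 0)
    = (pvG w kn m, ((List.range m).map (fun j => pvG w kn (j + 1))).foldl max (pvG w kn 0)) := by
  induction m with
  | zero =>
    rw [show (kn : Int) + (0 : Nat) = (kn : Int) by simp, PySem.List.pyRange_one_eq_nil (by omega)]
    simp
  | succ m ih =>
    have hcast : (kn : Int) + ((m + 1 : Nat) : Int) = ((kn : Int) + (m : Int)) + 1 := by push_cast; ring
    rw [hcast, PySem.List.pyRange_one_succ_right (by omega), List.foldl_append, ih]
    simp only [List.foldl_cons, List.foldl_nil]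
    have h1 : PySem.List.pyGetD w ((kn : Int) + (m : Int)) 0 = w.getD (m + kn) 0 := by
      rw [show (kn : Int) + (m : Int) = ((m + kn : Nat) : Int) by push_cast; ring,
        PySem.List.pyGetD_natCast]
    have h2 : PySem.List.pyGetD w ((kn : Int) + (m : Int) - (kn : Int)) 0 = w.getD m 0 := by
      rw [show (kn : Int) + (m : Int) - (kn : Int) = ((m : Nat) : Int) by ring,
        PySem.List.pyGetD_natCast]
    have hg : pvG w kn m + w.getD (m + kn) 0 - w.getD m 0 = pvG w kn (m + 1) := by
      rw [pv_slide]
    rw [List.range_succ, List.map_append, List.foldl_append]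
    simp only [List.map_cons, List.map_nil, List.foldl_cons, List.foldl_nil]
    rw [h1, h2, Prod.mk.injEq]
    constructor
    · exact hg
    · rw [hg]
      omega

-- window sums of num (via wgt) equal pvG of w := num.map pvWgt
theorem pv_win_eq_g (num : List Int) (kn i : Nat) (h : i + kn ≤ num.length) :
    (((num.drop i).take kn).map pvWgt).sum = pvG (num.map pvWgt) kn i := by
  rw [List.map_take, List.map_drop, pv_window_sum (num.map pvWgt) kn i (by simpa using h)]
  rfl

theorem pv_best_shift (g : Nat → Int) (m : Nat) :
    max 0 (((List.range m).map (fun j => g (j + 1))).foldl max (g 0)) = pvBest g (m + 1) := by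
  unfold pvBest
  rw [pv_max_foldl, List.range_succ_eq_map]
  simp only [List.foldl_cons, List.foldl_map]

-- a fold of a constant running max from its own base is the base
theorem pv_foldl_max_const {A : Type} (l : List A) (b : Int) :
    l.foldl (fun M _ => max M b) b = b := by
  induction l with
  | nil => rfl
  | cons x t ih => simp only [List.foldl_cons, max_self]; exact ih

-- A evaluated in the main case 1 ≤ k ≤ n
theorem pv_A_main (num : List Int) (kn : Nat) (_h1 : 1 ≤ kn) (h2 : kn ≤ num.length) :
    solve num (kn : Int)
    = (num.count 1 : Int) + pvBest (pvG (num.map pvWgt) kn) (num.length - kn + 1) := by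
  unfold solve
  simp only [PySem.List.count_eq]
  have hM : (num.length : Int) - (kn : Int) + 1 = ((num.length - kn + 1 : Nat) : Int) := by omega
  rw [hM]
  refine Eq.trans (PySem.List.foldl_congr_mem _ _ _ _ ?_)
    (pv_maxfold (pvG (num.map pvWgt) kn) ((num.count 1 : Int)) (num.length - kn + 1))
  intro acc i hi
  have hmem := (PySem.List.mem_pyRange_one).1 hi
  have hi0 : ((i.toNat : Nat) : Int) = i := Int.toNat_of_nonneg hmem.1
  have hbound : i.toNat + kn ≤ num.length := by omega
  rw [← hi0, pv_flip_fold num i.toNat kn hbound, pv_count_flipped num i.toNat kn hbound,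
    pv_win_eq_g num kn i.toNat hbound]
  simp only [Int.toNat_natCast]

-- B evaluated in the main case 1 ≤ k ≤ n
theorem pv_B_main (num : List Int) (kn : Nat) (h1 : 1 ≤ kn) (h2 : kn ≤ num.length) :
    solve_alt num (kn : Int)
    = (num.count 1 : Int) + pvBest (pvG (num.map pvWgt) kn) (num.length - kn + 1) := by
  unfold solve_alt
  rw [if_neg (by omega)]
  have hcur : (PySem.List.slice (num.map pvWgt) none (some (kn : Int))).sum
      = pvG (num.map pvWgt) kn 0 := by
    rw [PySem.List.slice_to_natCast]
    have := pv_window_sum (num.map pvWgt) kn 0 (by simp; omega)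
    unfold pvG
    simpa using this
  simp only [hcur]
  have hn : (num.length : Int) = (kn : Int) + ((num.length - kn : Nat) : Int) := by omega
  rw [hn, pv_slidefold, pv_best_shift (pvG (num.map pvWgt) kn) (num.length - kn)]
  rw [List.count_eq_countP]

-- ===== VERDICT (by name: the statement is the Claim_ definition above) =====
theorem solve_spec : Claim_equal_solve := by
  intro num k _
  unfold Spec_solve
  by_cases hk1 : k < 1
  · have hB : solve_alt num k = (num.count 1 : Int) := by
      unfold solve_alt
      rw [if_pos (Or.inl hk1), List.count_eq_countP]
    have hA : solve num k = (num.count 1 : Int) := by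
      unfold solve
      simp only [PySem.List.count_eq,
        PySem.List.pyRange_one_eq_nil (show k ≤ (0 : Int) by omega), List.foldl_nil]
      exact pv_foldl_max_const _ _
    rw [hA, hB]
  · by_cases hk2 : (num.length : Int) < k
    · have hB : solve_alt num k = (num.count 1 : Int) := by
        unfold solve_alt
        rw [if_pos (Or.inr hk2), List.count_eq_countP]
      have hA : solve num k = (num.count 1 : Int) := by
        unfold solve
        simp only [PySem.List.count_eq]
        rw [PySem.List.pyRange_one_eq_nil (show (num.length : Int) - k + 1 ≤ 0 by omega),
          List.foldl_nil]
      rw [hA, hB]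
    · have hk : k = (k.toNat : Int) := by omega
      rw [hk, pv_A_main num k.toNat (by omega) (by omega),
        pv_B_main num k.toNat (by omega) (by omega)]
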